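-- pv_equiv track=rewrite | github.com/gunthercox/ChatterBot | chatterbot/apis/__init__.py | remove_trailing_usernames
-- ===== SOURCE A (Python) =====
-- def remove_trailing_usernames(text):
--
--     # The base case is that the is only one word
--     if not len(text.split(" ", 1)) > 1:
--         return text
--
--     last_word = text.split(" ")[-1]
--
--     if len(last_word) > 0 and last_word[0] == "@":
--         text = text[:-len(last_word)]
--         text = text.strip()
--
--     last_word = text.split(" ")[-1]
--
--     if last_word[0] == "@":
--         text = remove_trailing_usernames(text)
--
--     return text
-- ===== SOURCE B (Python) =====
-- def remove_trailing_usernames(text):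
--     # Iterative rpartition-based rewrite: peel off trailing @-words with
--     # str.rpartition instead of recursion + split + negative slicing.
--     head, sep, last = text.rpartition(" ")
--     while sep and last.startswith("@"):
--         text = head.strip()
--         head, sep, last = text.rpartition(" ")
--     return text
-- ===== Notes on version B (the rewrite author's own statement) =====
-- stated objective: simpler
-- what changed: A's tail recursion with text.split(' ', 1), text.split(' ')[-1] and negative slicing is replaced by a plain while loop that repeatedly rpartitions at the last space and strips the head; B never raises where A's unguarded last_word[0] does.
-- outside the precondition, e.g. on remove_trailing_usernames(' '): A raises IndexError, B returns ' '; on remove_trailing_usernames('a '): A raises IndexError, B returns 'a '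
-- crash fix: On inputs that end with a space, or whose trailing @-word is preceded only by whitespace, A raises IndexError at last_word[0]; B returns the text unchanged (resp. the stripped empty remainder). — e.g. on remove_trailing_usernames("a "): A raises IndexError, B returns "a "
import Mathlib
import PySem

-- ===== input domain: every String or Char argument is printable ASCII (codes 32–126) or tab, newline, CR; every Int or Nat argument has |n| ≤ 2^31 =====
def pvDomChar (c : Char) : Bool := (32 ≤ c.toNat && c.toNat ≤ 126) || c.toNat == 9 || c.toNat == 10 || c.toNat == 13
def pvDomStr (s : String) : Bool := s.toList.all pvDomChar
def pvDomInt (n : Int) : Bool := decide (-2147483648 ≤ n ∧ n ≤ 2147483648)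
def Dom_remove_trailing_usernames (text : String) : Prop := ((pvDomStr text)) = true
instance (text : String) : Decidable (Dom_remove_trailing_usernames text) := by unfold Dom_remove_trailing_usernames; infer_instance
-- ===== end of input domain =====

-- B is a simpler re-decomposition: an iterative rpartition-at-the-last-space loop instead of
-- A's recursion with split(" ")[-1] and negative slicing; equal return values on Pre_ (A raises
-- IndexError outside Pre_, where B just returns).

-- shared small helper: the characters strictly after the last ' ' (the whole string if none)
def pvNotSpace (c : Char) : Bool := !decide (c = ' ')
def pvTail (cs : List Char) : List Char := (cs.reverse.takeWhile pvNotSpace).reverse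

-- ===== PORT A =====
-- text.split(" ")[-1]  (total: Python's split always returns a nonempty list)
def pyLastWord (cs : List Char) : List Char :=
  ((PySem.Chars.split? cs [' ']).getD []).getLast?.getD []

-- the conditional reassignment in the middle of A:
--   if len(last_word) > 0 and last_word[0] == "@": text = text[:-len(last_word)]; text = text.strip()
def removeAStep (cs : List Char) : List Char :=
  if 0 < (pyLastWord cs).length ∧ (pyLastWord cs)[0]? = some '@'
  then PySem.Chars.strip (PySem.Chars.slice cs none (some (-((pyLastWord cs).length : Int))))
  else cs

-- A's recursion, with a fuel guard for totality only (each recursive call strictly shortens the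
-- string, so fuel = length + 1 never runs out; fuel 0 is unreachable)
def removeAGo (fuel : Nat) (cs : List Char) : List Char :=
  match fuel with
  | 0 => cs
  | fuel + 1 =>
    -- if not len(text.split(" ", 1)) > 1: return text
    if ¬ 1 < ((PySem.Chars.splitMax? cs [' '] 1).getD []).length then cs
    else
      -- last_word = text.split(" ")[-1]; if last_word[0] == "@": text = remove_trailing_usernames(text)
      -- (Python raises IndexError when that last_word is empty — excluded by Pre_; [0]? is none there)
      if (pyLastWord (removeAStep cs))[0]? = some '@' then removeAGo fuel (removeAStep cs)
      else removeAStep cs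

def remove_trailing_usernames (text : String) : String :=
  String.ofList (removeAGo (text.toList.length + 1) text.toList)

-- ===== PORT B =====
-- hand port of Python's text.rpartition(" ") (no PySem primitive; exact: splits at the LAST
-- space, ("", "", text) when there is none): returns (head, sep, last)
def rpartitionSpace (cs : List Char) : List Char × List Char × List Char :=
  if (pvTail cs).length = cs.length then ([], [], cs)
  else (cs.take (cs.length - (pvTail cs).length - 1), [' '], pvTail cs)

-- B's while loop, one recursive call per iteration (same fuel guard as above, unreachable)
def removeBGo (fuel : Nat) (cs : List Char) : List Char :=
  match fuel with
  | 0 => cs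
  | fuel + 1 =>
    -- while sep and last.startswith("@"): text = head.strip(); head, sep, last = text.rpartition(" ")
    if (rpartitionSpace cs).2.1 ≠ [] ∧ PySem.Chars.startswith (rpartitionSpace cs).2.2 ['@'] = true
    then removeBGo fuel (PySem.Chars.strip (rpartitionSpace cs).1)
    else cs

def remove_trailing_usernames_alt (text : String) : String :=
  String.ofList (removeBGo (text.toList.length + 1) text.toList)

-- ===== PRECONDITION & SPEC =====
-- A raises IndexError exactly when the input ends in ' ', or when a trailing @-word is preceded
-- only by whitespace (so that the removal leaves the empty string); Pre_ excludes exactly those.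
def pvBadInput (cs : List Char) : Bool :=
  cs.getLast? == some ' ' ||
  (cs.contains ' ' && (pvTail cs)[0]? == some '@'
    && (cs.take (cs.length - (pvTail cs).length)).all PySem.Chars.isspace)

def Pre_remove_trailing_usernames (text : String) : Prop :=
  pvBadInput text.toList = false
instance (text : String) : Decidable (Pre_remove_trailing_usernames text) := by
  unfold Pre_remove_trailing_usernames; infer_instance

def pvWitness_remove_trailing_usernames : String := "hello @you"

-- On inputs that end in a space, or whose trailing @-word is preceded only by whitespace,
-- A raises IndexError; B returns the text unchanged (resp. the stripped-empty remainder).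
def Raises_remove_trailing_usernames (text : String) : Prop :=
  pvBadInput text.toList = true
instance (text : String) : Decidable (Raises_remove_trailing_usernames text) := by
  unfold Raises_remove_trailing_usernames; infer_instance
def pvRaiseWitness_remove_trailing_usernames : String := "a "
def pvRaiseWitnessOut_remove_trailing_usernames : String := "a "

def Spec_remove_trailing_usernames (text : String) (out : String) : Prop :=
  out = remove_trailing_usernames_alt text
instance (text : String) (out : String) : Decidable (Spec_remove_trailing_usernames text out) := by
  unfold Spec_remove_trailing_usernames; infer_instance

-- ===== CLAIM (what is proved, stated in full; the proofs are below) =====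
def Claim_equal_remove_trailing_usernames : Prop := ∀ (text : String), Dom_remove_trailing_usernames text → Pre_remove_trailing_usernames text → Spec_remove_trailing_usernames text (remove_trailing_usernames text)

def Claim_raises_remove_trailing_usernames : Prop := (∀ (text : String), Dom_remove_trailing_usernames text → Raises_remove_trailing_usernames text → ¬ Pre_remove_trailing_usernames text) ∧ (Dom_remove_trailing_usernames (pvRaiseWitness_remove_trailing_usernames) ∧ Raises_remove_trailing_usernames (pvRaiseWitness_remove_trailing_usernames) ∧ remove_trailing_usernames_alt (pvRaiseWitness_remove_trailing_usernames) = pvRaiseWitnessOut_remove_trailing_usernames)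

-- ===== LEMMAS AND PROOFS =====

lemma pv_tw_all {l : List Char} (hm : ' ' ∉ l) : List.takeWhile pvNotSpace l = l :=
  List.takeWhile_eq_self_iff.2 (by intro x hx; simp [pvNotSpace]; rintro rfl; exact hm hx)

lemma pv_tw_len {l : List Char} (hm : ' ' ∈ l) :
    (List.takeWhile pvNotSpace l).length ≠ l.length := by
  intro h
  have heq := (List.takeWhile_prefix (l := l) (p := pvNotSpace)).eq_of_length h
  have := List.takeWhile_eq_self_iff.1 heq ' ' hm
  simp [pvNotSpace] at this

lemma pv_tw_append_mem {l : List Char} (hm : ' ' ∈ l) (t : List Char) :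
    List.takeWhile pvNotSpace (l ++ t) = List.takeWhile pvNotSpace l := by
  rw [List.takeWhile_append, if_neg (pv_tw_len hm)]

lemma pv_tw_append_nomem {l : List Char} (hm : ' ' ∉ l) (t : List Char) :
    List.takeWhile pvNotSpace (l ++ t) = l ++ List.takeWhile pvNotSpace t := by
  rw [List.takeWhile_append, if_pos (by rw [pv_tw_all hm])]

lemma pv_tail_cons_mem {rest : List Char} (hm : ' ' ∈ rest) (c : Char) :
    pvTail (c :: rest) = pvTail rest := by
  unfold pvTail
  rw [List.reverse_cons, pv_tw_append_mem (by simpa using hm)]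

lemma pv_tail_nomem {l : List Char} (hm : ' ' ∉ l) : pvTail l = l := by
  unfold pvTail
  rw [pv_tw_all (by simpa using hm), List.reverse_reverse]

lemma pv_tail_len_le (cs : List Char) : (pvTail cs).length ≤ cs.length := by
  simpa [pvTail] using (List.takeWhile_prefix pvNotSpace (l := cs.reverse)).length_le

lemma pv_go0 (fuel : Nat) (l cur : List Char) (acc : List (List Char)) :
    PySem.Chars.splitOnMax.go [' '] fuel 0 l cur acc = ((cur.reverse ++ l) :: acc).reverse := by
  match fuel, l with
  | 0, l => rfl
  | fuel+1, [] => simp [PySem.Chars.splitOnMax.go]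
  | fuel+1, c :: rest => simp [PySem.Chars.splitOnMax.go]

lemma pv_go1_len (fuel : Nat) (l cur : List Char) (acc : List (List Char)) (h : l.length < fuel) :
    (PySem.Chars.splitOnMax.go [' '] fuel 1 l cur acc).length
      = acc.length + (if ' ' ∈ l then 2 else 1) := by
  induction fuel generalizing l cur acc with
  | zero => omega
  | succ fuel ih =>
    match l with
    | [] => simp [PySem.Chars.splitOnMax.go]
    | c :: rest =>
      by_cases hc : c = ' '
      · subst hc
        simp [PySem.Chars.splitOnMax.go, List.isPrefixOf, pv_go0]
      · have hb : (' ' == c) = false := by simpa using (Ne.symm hc)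
        simp [PySem.Chars.splitOnMax.go, List.isPrefixOf, hb, Ne.symm hc,
          ih rest (c :: cur) acc (by simpa using Nat.lt_of_succ_lt_succ h)]

lemma pv_splitmax_len (cs : List Char) :
    ((PySem.Chars.splitMax? cs [' '] 1).getD []).length = if ' ' ∈ cs then 2 else 1 := by
  simp [PySem.Chars.splitMax?, PySem.Chars.splitOnMax]
  rw [pv_go1_len cs.length.succ cs [] [] (Nat.lt_succ_self _)]
  simp

lemma pv_goL (fuel : Nat) (l cur : List Char) (acc : List (List Char)) (h : l.length < fuel) :
    ((PySem.Chars.splitOn.go [' '] fuel l cur acc).getLast?).getD []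
      = if ' ' ∈ l then pvTail l else cur.reverse ++ l := by
  induction fuel generalizing l cur acc with
  | zero => omega
  | succ fuel ih =>
    match l with
    | [] => simp [PySem.Chars.splitOn.go, List.getLast?_reverse]
    | c :: rest =>
      by_cases hc : c = ' '
      · subst hc
        rw [show PySem.Chars.splitOn.go [' '] (fuel+1) (' ' :: rest) cur acc
              = PySem.Chars.splitOn.go [' '] fuel rest [] (cur.reverse :: acc) by
            simp [PySem.Chars.splitOn.go, List.isPrefixOf]]
        rw [ih rest [] _ (by simpa using Nat.lt_of_succ_lt_succ h)]
        by_cases hm : ' ' ∈ rest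
        · simp [hm, pv_tail_cons_mem hm]
        · have htl : pvTail (' ' :: rest) = rest := by
            unfold pvTail
            rw [List.reverse_cons, pv_tw_append_nomem (by simpa using hm)]
            simp [pvNotSpace]
          simp [hm, htl]
      · have hb : (' ' == c) = false := by simpa using (Ne.symm hc)
        rw [show PySem.Chars.splitOn.go [' '] (fuel+1) (c :: rest) cur acc
              = PySem.Chars.splitOn.go [' '] fuel rest (c :: cur) acc by
            simp [PySem.Chars.splitOn.go, List.isPrefixOf, hb]]
        rw [ih rest (c :: cur) _ (by simpa using Nat.lt_of_succ_lt_succ h)]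
        by_cases hm : ' ' ∈ rest
        · simp [hm, Ne.symm hc, pv_tail_cons_mem hm]
        · simp [hm, Ne.symm hc]

lemma pv_lastword (cs : List Char) : pyLastWord cs = pvTail cs := by
  unfold pyLastWord
  simp only [PySem.Chars.split?, PySem.Chars.splitOn]
  rw [if_neg (by simp)]
  simp only [Option.getD_some]
  rw [pv_goL cs.length.succ cs [] [] (Nat.lt_succ_self _)]
  by_cases hm : ' ' ∈ cs
  · simp [hm]
  · simp [hm, pv_tail_nomem hm]

lemma pv_strip_length_le (xs : List Char) : (PySem.Chars.strip xs).length ≤ xs.length := by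
  unfold PySem.Chars.strip PySem.Chars.rstrip PySem.Chars.lstrip
  simp only [List.length_reverse]
  exact le_trans (List.length_dropWhile_le _ _)
    (by simpa using List.length_dropWhile_le PySem.Chars.isspace xs)

lemma pv_slice_take {cs : List Char} {k : Nat} (hk1 : 1 ≤ k) (hk2 : k ≤ cs.length) :
    PySem.Chars.slice cs none (some (-(k : Int))) = cs.take (cs.length - k) := by
  unfold PySem.Chars.slice PySem.List.slice PySem.List.clampIdx
  simp only []
  rw [if_pos (by omega : -(k:Int) < 0), if_neg (by omega : ¬ ((cs.length : Int) + -(k:Int) < 0))]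
  simp
  omega

lemma pv_decomp {cs : List Char} (h : ' ' ∈ cs) :
    ∃ w : List Char, cs = w ++ [' '] ++ pvTail cs
      ∧ w.length = cs.length - (pvTail cs).length - 1
      ∧ (pvTail cs).length < cs.length := by
  have hsplit := (List.takeWhile_append_dropWhile (p := pvNotSpace) (l := cs.reverse)).symm
  obtain ⟨d, ds, hd⟩ : ∃ d ds, List.dropWhile pvNotSpace cs.reverse = d :: ds := by
    rcases hdw : List.dropWhile pvNotSpace cs.reverse with _ | ⟨d, ds⟩
    · rw [hdw, List.append_nil] at hsplit
      exact absurd (congrArg List.length hsplit.symm) (pv_tw_len (by simpa using h))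
    · exact ⟨d, ds, rfl⟩
  have hdsp : d = ' ' := by
    have := List.head?_dropWhile_not pvNotSpace cs.reverse
    rw [hd] at this
    simpa [pvNotSpace] using this
  subst hdsp
  refine ⟨ds.reverse, ?_, ?_, ?_⟩
  · conv_lhs => rw [← cs.reverse_reverse, hsplit, hd]
    simp [pvTail]
  · have := congrArg List.length hsplit
    rw [hd] at this
    simp only [List.length_reverse, List.length_append, List.length_cons] at this ⊢
    simp [pvTail]; omega
  · have := congrArg List.length hsplit
    rw [hd] at this
    simp only [List.length_reverse, List.length_append, List.length_cons] at this
    simp [pvTail]; omega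

lemma pv_rstrip_append (y : List Char) :
    PySem.Chars.rstrip (y ++ [' ']) = PySem.Chars.rstrip y := by
  unfold PySem.Chars.rstrip
  simp [PySem.Chars.isspace]

lemma pv_strip_append (xs : List Char) :
    PySem.Chars.strip (xs ++ [' ']) = PySem.Chars.strip xs := by
  unfold PySem.Chars.strip PySem.Chars.lstrip
  rw [List.dropWhile_append]
  by_cases he : (List.dropWhile PySem.Chars.isspace xs).isEmpty
  · rw [if_pos he]
    rw [List.isEmpty_iff.1 he]
    simp [PySem.Chars.rstrip, PySem.Chars.isspace]
  · rw [if_neg he, pv_rstrip_append]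

lemma pv_startswith_at (xs : List Char) :
    (PySem.Chars.startswith xs ['@'] = true) ↔ xs[0]? = some '@' := by
  rcases xs with _ | ⟨c, rest⟩
  · simp [PySem.Chars.startswith, List.isPrefixOf]
  · simp [PySem.Chars.startswith, List.isPrefixOf]
    exact eq_comm

lemma pv_rpart_nomem {cs : List Char} (hm : ' ' ∉ cs) : rpartitionSpace cs = ([], [], cs) := by
  unfold rpartitionSpace
  rw [if_pos (by rw [pv_tail_nomem hm])]

lemma pv_rpart_mem {cs : List Char} (hm : ' ' ∈ cs) :
    rpartitionSpace cs
      = (cs.take (cs.length - (pvTail cs).length - 1), [' '], pvTail cs) := by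
  obtain ⟨w, hw, hwlen, hlt⟩ := pv_decomp hm
  unfold rpartitionSpace
  rw [if_neg (by omega)]

-- the step of A, rewritten: when the last word starts with '@', A strips the head before the
-- last space
lemma pv_step_at {cs : List Char} (hm : ' ' ∈ cs) (hat : (pvTail cs)[0]? = some '@') :
    removeAStep cs = PySem.Chars.strip (cs.take (cs.length - (pvTail cs).length - 1)) := by
  obtain ⟨w, hw, hwlen, hlt⟩ := pv_decomp hm
  have ht1 : 1 ≤ (pvTail cs).length := by
    rcases htl : pvTail cs with _ | _
    · rw [htl] at hat; simp at hat
    · simp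
  unfold removeAStep
  rw [pv_lastword, if_pos ⟨by omega, hat⟩]
  rw [pv_slice_take ht1 (pv_tail_len_le cs)]
  have hlen' : (w ++ [' ']).length = cs.length - (pvTail cs).length := by simp; omega
  have htake : cs.take (cs.length - (pvTail cs).length) = w ++ [' '] := by
    rw [← hlen']
    conv_lhs => rw [hw]
    exact List.take_left' rfl
  have htake1 : cs.take (cs.length - (pvTail cs).length - 1) = w := by
    rw [← hwlen]
    conv_lhs => rw [hw, List.append_assoc]
    exact List.take_left' rfl
  rw [htake, htake1, pv_strip_append]

lemma pv_step_noat {cs : List Char} (hat : ¬ (pvTail cs)[0]? = some '@') :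
    removeAStep cs = cs := by
  unfold removeAStep
  rw [pv_lastword, if_neg (by rintro ⟨-, h⟩; exact hat h)]

lemma pv_removeB_of_not_at {cs : List Char} (f : Nat) (hat : ¬ (pvTail cs)[0]? = some '@') :
    removeBGo f cs = cs := by
  match f with
  | 0 => rfl
  | f + 1 =>
    unfold removeBGo
    rw [if_neg]
    rintro ⟨hsep, hsw⟩
    by_cases hm : ' ' ∈ cs
    · rw [pv_rpart_mem hm] at hsw
      exact hat ((pv_startswith_at _).1 hsw)
    · rw [pv_rpart_nomem hm] at hsep
      exact hsep rfl

lemma pv_main (f : Nat) : ∀ cs : List Char, cs.length < f → removeAGo f cs = removeBGo f cs := by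
  induction f with
  | zero => intro cs h; omega
  | succ f ih =>
    intro cs hf
    unfold removeAGo removeBGo
    by_cases hm : ' ' ∈ cs
    · rw [if_neg (by rw [pv_splitmax_len, if_pos hm]; omega)]
      by_cases hat : (pvTail cs)[0]? = some '@'
      · -- a trailing @-word is removed by both
        have hstep := pv_step_at hm hat
        obtain ⟨w, hw, hwlen, hlt⟩ := pv_decomp hm
        have hlen : (removeAStep cs).length < cs.length := by
          rw [hstep]
          refine lt_of_le_of_lt (pv_strip_length_le _) ?_
          simp [List.length_take]
          omega
        rw [pv_rpart_mem hm]
        simp only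
        have hbc : (([' '] : List Char) ≠ []
            ∧ PySem.Chars.startswith (pvTail cs) ['@'] = true) :=
          ⟨by simp, (pv_startswith_at _).2 hat⟩
        by_cases h2 : (pyLastWord (removeAStep cs))[0]? = some '@'
        · rw [if_pos h2, if_pos hbc, ← hstep]
          exact ih (removeAStep cs) (by omega)
        · rw [if_neg h2, if_pos hbc, ← hstep]
          rw [pv_lastword] at h2
          exact (pv_removeB_of_not_at f h2).symm
      · -- last word does not start with '@': both return the input unchanged
        rw [pv_step_noat hat, if_neg (by rw [pv_lastword]; exact hat)]
        rw [if_neg (by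
          rw [pv_rpart_mem hm]
          rintro ⟨-, hsw⟩
          exact hat ((pv_startswith_at _).1 hsw))]
    · -- no space: both are the identity
      rw [if_pos (by rw [pv_splitmax_len, if_neg hm]; omega)]
      rw [if_neg (by rw [pv_rpart_nomem hm]; rintro ⟨hsep, -⟩; exact hsep rfl)]

-- ===== VERDICT (by name: the statement is the Claim_ definition above) =====
theorem remove_trailing_usernames_spec : Claim_equal_remove_trailing_usernames := by
  intro text _ _
  unfold Spec_remove_trailing_usernames remove_trailing_usernames remove_trailing_usernames_alt
  rw [pv_main (text.toList.length + 1) text.toList (Nat.lt_succ_self _)]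

def remove_trailing_usernames_raises : Claim_raises_remove_trailing_usernames := by
  unfold Claim_raises_remove_trailing_usernames
  refine ⟨?_, by decide⟩
  intro text _ hr hp
  unfold Raises_remove_trailing_usernames at hr
  unfold Pre_remove_trailing_usernames at hp
  rw [hr] at hp
  exact Bool.noConfusion hp
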